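-- pv_equiv track=rewrite | github.com/permissionx/CascadeSim | cascade_scripts/extract_defect.py | get_out_cluster_name
-- ===== SOURCE A (Python) =====
-- def get_out_cluster_name(filename): # only for linux
--     names = filename.split('/')
--     name = names[-1]
--     names[-1] = "cluster_"+name
--     outname = ""
--     for n,name in enumerate(names):
--         outname += name
--         if n != len(names)-1:
--             outname += '/'
--     return outname
-- ===== SOURCE B (Python) =====
-- def get_out_cluster_name(filename): # only for linux
--     i = filename.rfind('/')
--     return filename[:i+1] + "cluster_" + filename[i+1:]
-- ===== Notes on version B (the rewrite author's own statement) =====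
-- stated objective: simpler
-- what changed: Replaces the split-into-list, last-element mutation and enumerate/join reconstruction loop with a single rfind of the last separator and two flat-string slices.
import Mathlib
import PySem

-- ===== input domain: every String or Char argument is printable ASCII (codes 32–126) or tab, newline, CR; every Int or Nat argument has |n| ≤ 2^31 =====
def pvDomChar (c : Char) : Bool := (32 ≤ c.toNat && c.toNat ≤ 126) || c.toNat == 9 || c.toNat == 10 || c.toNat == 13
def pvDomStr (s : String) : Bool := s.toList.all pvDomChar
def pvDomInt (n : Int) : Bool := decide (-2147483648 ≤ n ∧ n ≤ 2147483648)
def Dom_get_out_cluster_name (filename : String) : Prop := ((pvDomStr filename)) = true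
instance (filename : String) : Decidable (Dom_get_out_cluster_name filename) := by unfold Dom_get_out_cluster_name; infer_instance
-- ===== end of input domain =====

-- B replaces A's split/mutate/enumerate-join reconstruction by one rfind and two slices (simpler).

-- ===== PORT A =====
def get_out_cluster_name (filename : String) : String :=
  let names := PySem.Chars.splitOn filename.toList ['/']
  let name := (PySem.List.pyGet? names (-1)).getD []      -- names[-1]; split never returns [] so the default is dead
  let names := names.dropLast ++ ["cluster_".toList ++ name]  -- names[-1] = "cluster_" + name
  let outname : List Char :=
    (PySem.List.enumerate names).foldl
      (fun outname p =>
        let outname := outname ++ p.2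
        if p.1 ≠ (names.length : Int) - 1 then outname ++ ['/'] else outname)
      []
  String.ofList outname

-- ===== PORT B =====
def get_out_cluster_name_alt (filename : String) : String :=
  let i := PySem.Chars.rfind filename.toList ['/']
  String.ofList (PySem.List.slice filename.toList none (some (i + 1)) ++
             "cluster_".toList ++
             PySem.List.slice filename.toList (some (i + 1)) none)

-- ===== PRECONDITION & SPEC =====
def Spec_get_out_cluster_name (filename : String) (out : String) : Prop := out = get_out_cluster_name_alt filename
instance (filename : String) (out : String) : Decidable (Spec_get_out_cluster_name filename out) := by unfold Spec_get_out_cluster_name; infer_instance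

-- ===== CLAIM (what is proved, stated in full; the proofs are below) =====
def Claim_equal_get_out_cluster_name : Prop := ∀ (filename : String), Dom_get_out_cluster_name filename → Spec_get_out_cluster_name filename (get_out_cluster_name filename)

-- ===== LEMMAS AND PROOFS =====

-- head-extension of the first piece of a split
def consHead (x : List Char) : List (List Char) → List (List Char)
  | [] => [x]
  | h :: t => (x ++ h) :: t

-- reference split on '/'
def split1 : List Char → List (List Char)
  | [] => [[]]
  | c :: r => if c = '/' then [] :: split1 r else consHead [c] (split1 r)

-- reference join with '/'
def join1 : List (List Char) → List Char
  | [] => []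
  | [x] => x
  | x :: y :: t => x ++ '/' :: join1 (y :: t)

theorem split1_ne_nil (cs : List Char) : split1 cs ≠ [] := by
  cases cs with
  | nil => simp [split1]
  | cons c r =>
    simp only [split1]
    split_ifs
    · simp
    · cases h : split1 r <;> simp [consHead]

theorem consHead_nil (l : List (List Char)) (h : l ≠ []) : consHead [] l = l := by
  cases l with
  | nil => exact absurd rfl h
  | cons a t => simp [consHead]

theorem consHead_consHead (x y : List Char) (l : List (List Char)) :
    consHead x (consHead y l) = consHead (x ++ y) l := by
  cases l <;> simp [consHead]

theorem go_spec (l cur : List Char) (acc : List (List Char)) (f : Nat) (hf : l.length ≤ f) :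
    PySem.Chars.splitOn.go ['/'] f l cur acc = acc.reverse ++ consHead cur.reverse (split1 l) := by
  induction l generalizing cur acc f with
  | nil =>
    cases f with
    | zero => simp [PySem.Chars.splitOn.go, split1, consHead]
    | succ f' => simp [PySem.Chars.splitOn.go, split1, consHead]
  | cons c rest ih =>
    cases f with
    | zero => simp at hf
    | succ f' =>
      by_cases hc : c = '/'
      · subst hc
        rw [show PySem.Chars.splitOn.go ['/'] (f' + 1) ('/' :: rest) cur acc
              = PySem.Chars.splitOn.go ['/'] f' rest [] (cur.reverse :: acc) by
            simp [PySem.Chars.splitOn.go, List.isPrefixOf]]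
        rw [ih [] (cur.reverse :: acc) f' (by simpa using Nat.lt_succ_iff.mp (Nat.lt_of_lt_of_le (by simp) hf))]
        obtain ⟨h, t, he⟩ : ∃ h t, split1 rest = h :: t := by
          cases hs : split1 rest with
          | nil => exact absurd hs (split1_ne_nil rest)
          | cons h t => exact ⟨h, t, rfl⟩
        simp [split1, he, consHead]
      · rw [show PySem.Chars.splitOn.go ['/'] (f' + 1) (c :: rest) cur acc
              = PySem.Chars.splitOn.go ['/'] f' rest (c :: cur) acc by
            simp [PySem.Chars.splitOn.go, List.isPrefixOf, Ne.symm hc]]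
        rw [ih (c :: cur) acc f' (by simpa using Nat.lt_succ_iff.mp (Nat.lt_of_lt_of_le (by simp) hf))]
        simp [split1, hc, consHead_consHead]

theorem splitOn_eq (cs : List Char) : PySem.Chars.splitOn cs ['/'] = split1 cs := by
  rw [PySem.Chars.splitOn, go_spec cs [] [] (cs.length + 1) (by omega)]
  simp [consHead_nil _ (split1_ne_nil cs)]

theorem split1_no_sep (q : List Char) (h : '/' ∉ q) : split1 q = [q] := by
  induction q with
  | nil => simp [split1]
  | cons c r ih =>
    simp only [List.mem_cons, not_or] at h
    simp [split1, ih h.2, consHead]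
    exact fun hc => absurd hc.symm h.1

theorem split1_append (xs q : List Char) (hq : '/' ∉ q) :
    split1 (xs ++ '/' :: q) = split1 xs ++ [q] := by
  induction xs with
  | nil => simp [split1, split1_no_sep q hq]
  | cons c r ih =>
    by_cases hc : c = '/'
    · subst hc; simp [split1, ih]
    · simp only [List.cons_append, split1, hc, if_false, ih]
      obtain ⟨h, t, he⟩ : ∃ h t, split1 r = h :: t := by
        cases hs : split1 r with
        | nil => exact absurd hs (split1_ne_nil r)
        | cons h t => exact ⟨h, t, rfl⟩
      simp [he, consHead]

theorem join1_split1 (p : List Char) : join1 (split1 p) = p := by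
  induction p with
  | nil => simp [split1, join1]
  | cons c r ih =>
    obtain ⟨h, t, he⟩ : ∃ h t, split1 r = h :: t := by
      cases hs : split1 r with
      | nil => exact absurd hs (split1_ne_nil r)
      | cons h t => exact ⟨h, t, rfl⟩
    by_cases hc : c = '/'
    · subst hc
      rw [show split1 ('/' :: r) = [] :: split1 r by simp [split1], he]
      show join1 ([] :: h :: t) = '/' :: r
      rw [join1, ← he, ih]
      simp
    · rw [show split1 (c :: r) = consHead [c] (split1 r) by simp [split1, hc], he]
      show join1 ((c :: h) :: t) = c :: r
      cases t with
      | nil =>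
        have hh : h = r := by rw [← ih, he]; rfl
        simp [join1, hh]
      | cons y t' =>
        rw [join1, List.cons_append, ← join1, ← he, ih]

theorem join1_concat (l : List (List Char)) (x : List Char) (h : l ≠ []) :
    join1 (l ++ [x]) = join1 l ++ '/' :: x := by
  induction l with
  | nil => exact absurd rfl h
  | cons a t ih =>
    cases t with
    | nil => simp [join1]
    | cons b t' =>
      show join1 (a :: ((b :: t') ++ [x])) = join1 (a :: b :: t') ++ '/' :: x
      rw [show (b :: t') ++ [x] = b :: (t' ++ [x]) from rfl, join1, join1, ← List.cons_append,
          ih (by simp)]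
      simp

-- rfind.go for a single character
theorem go_step (s sub : List Char) (j : Nat) :
    PySem.Chars.rfind.go s sub j =
      if sub.isPrefixOf (s.drop j) then (j : Int)
      else if j = 0 then -1 else PySem.Chars.rfind.go s sub (j - 1) := by
  cases j with
  | zero => rw [PySem.Chars.rfind.go]; simp
  | succ j' => rw [PySem.Chars.rfind.go]; simp

theorem prefix_single_mem {s : List Char} {c : Char} (h : List.isPrefixOf [c] s = true) : c ∈ s := by
  cases s with
  | nil => simp [List.isPrefixOf] at h
  | cons a t => simp [List.isPrefixOf] at h; simp [h]

theorem rfind_go_not_mem (s : List Char) (c : Char) (h : c ∉ s) (j : Nat) :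
    PySem.Chars.rfind.go s [c] j = -1 := by
  induction j with
  | zero =>
    rw [go_step]
    split_ifs with hp h0
    · exact absurd (List.mem_of_mem_drop (prefix_single_mem hp)) h
    · rfl
    · omega
  | succ j' ih =>
    rw [go_step]
    split_ifs with hp h0
    · exact absurd (List.mem_of_mem_drop (prefix_single_mem hp)) h
    · rfl
    · simpa using ih

theorem rfind_go_found (p q : List Char) (c : Char) (hq : c ∉ q) (d : Nat) :
    PySem.Chars.rfind.go (p ++ c :: q) [c] (p.length + d) = (p.length : Int) := by
  induction d with
  | zero =>
    rw [Nat.add_zero, go_step, List.drop_left]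
    simp [List.isPrefixOf]
  | succ d' ih =>
    have hdrop : (p ++ c :: q).drop (p.length + (d' + 1)) = q.drop d' := by
      rw [List.drop_append]
      rw [List.drop_eq_nil_of_le (by omega), show p.length + (d' + 1) - p.length = d' + 1 by omega,
          List.drop_succ_cons]
      simp
    rw [go_step, hdrop]
    split_ifs with hp h0
    · exact absurd (List.mem_of_mem_drop (prefix_single_mem hp)) hq
    · omega
    · rw [show p.length + (d' + 1) - 1 = p.length + d' by omega]
      exact ih

theorem rfind_not_mem (s : List Char) (c : Char) (h : c ∉ s) :
    PySem.Chars.rfind s [c] = -1 := by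
  rw [PySem.Chars.rfind]; exact rfind_go_not_mem s c h s.length

theorem rfind_found (p q : List Char) (c : Char) (hq : c ∉ q) :
    PySem.Chars.rfind (p ++ c :: q) [c] = (p.length : Int) := by
  rw [PySem.Chars.rfind]
  rw [show (p ++ c :: q).length = p.length + (q.length + 1) by simp]
  exact rfind_go_found p q c hq (q.length + 1)

-- decompose at the LAST occurrence
theorem last_sep (cs : List Char) (h : '/' ∈ cs) :
    ∃ p q, cs = p ++ '/' :: q ∧ '/' ∉ q := by
  induction cs with
  | nil => simp at h
  | cons c r ih =>
    by_cases hr : '/' ∈ r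
    · obtain ⟨p, q, he, hq⟩ := ih hr
      exact ⟨c :: p, q, by rw [he]; rfl, hq⟩
    · have hc : c = '/' := by
        rcases List.mem_cons.mp h with h1 | h2
        · exact h1.symm
        · exact absurd h2 hr
      exact ⟨[], r, by rw [hc]; rfl, hr⟩

theorem pyGet_concat_neg_one (l : List (List Char)) (x : List Char) :
    PySem.List.pyGet? (l ++ [x]) (-1) = some x := by
  simp [PySem.List.pyGet?, PySem.List.pyIdx?]

-- A's reconstruction loop is join1
set_option maxHeartbeats 1000000 in
theorem fold_join (ns : List (List Char)) (L : Int) (i : Int) (acc : List Char)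
    (hne : ns ≠ []) (hL : i + ns.length = L) :
    (PySem.List.enumerate ns i).foldl
      (fun outname p => if p.1 ≠ L - 1 then outname ++ p.2 ++ ['/'] else outname ++ p.2)
      acc = acc ++ join1 ns := by
  induction ns generalizing i acc with
  | nil => exact absurd rfl hne
  | cons x t ih =>
    cases t with
    | nil =>
      have : i = L - 1 := by simp at hL; omega
      simp [PySem.List.enumerate_cons, PySem.List.enumerate_nil, this, join1]
    | cons y t' =>
      have hi : i ≠ L - 1 := by simp at hL; omega
      rw [PySem.List.enumerate_cons]
      simp only [List.foldl_cons, if_pos hi]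
      rw [ih (i + 1) (acc ++ x ++ ['/']) (by simp) (by simp at hL ⊢; omega)]
      simp [join1]

-- the core equality on char lists
set_option maxHeartbeats 1000000 in
theorem core_eq (cs : List Char) :
    get_out_cluster_name (String.ofList cs) = get_out_cluster_name_alt (String.ofList cs) := by
  simp only [get_out_cluster_name, get_out_cluster_name_alt, String.toList_ofList]
  by_cases hmem : '/' ∈ cs
  · obtain ⟨p, q, he, hq⟩ := last_sep cs hmem
    subst he
    rw [splitOn_eq, split1_append p q hq, pyGet_concat_neg_one, rfind_found p q '/' hq]
    rw [show (some q).getD ([] : List Char) = q from rfl]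
    rw [List.dropLast_concat]
    simp only [fold_join (split1 p ++ ["cluster_".toList ++ q])
          (((split1 p ++ ["cluster_".toList ++ q]).length : Int)) 0 [] (by simp) (by simp)]
    rw [join1_concat _ _ (split1_ne_nil p), join1_split1]
    rw [PySem.List.slice_to _ (by omega), PySem.List.slice_from _ (by omega)]
    rw [show ((p.length : Int) + 1).toNat = (p ++ ['/']).length by simp]
    rw [show p ++ '/' :: q = (p ++ ['/']) ++ q from by simp]
    rw [List.take_left, List.drop_left]
    simp
  · rw [splitOn_eq, split1_no_sep cs hmem,
        show PySem.List.pyGet? [cs] (-1) = some cs from pyGet_concat_neg_one [] cs,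
        rfind_not_mem cs '/' hmem]
    rw [show (List.dropLast [cs] ++ ["cluster_".toList ++ (some cs).getD []])
          = ["cluster_".toList ++ cs] from by simp]
    simp only [fold_join ["cluster_".toList ++ cs] ((["cluster_".toList ++ cs].length : Int)) 0 []
          (by simp) (by simp)]
    rw [show (-1 : Int) + 1 = 0 from by norm_num]
    rw [PySem.List.slice_to _ (by omega), PySem.List.slice_from _ (by omega)]
    simp [join1]

-- ===== VERDICT (by name: the statement is the Claim_ definition above) =====
theorem get_out_cluster_name_spec : Claim_equal_get_out_cluster_name := by
  intro filename _
  unfold Spec_get_out_cluster_name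
  have h : String.ofList filename.toList = filename := by
    simp
  rw [← h]
  exact core_eq filename.toList
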